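-- pv_equiv track=rewrite | github.com/stevenzim/WeatherTalk | wxtalk/modelbuilder/transformers.py | countNegatedContexts
-- ===== SOURCE A (Python) =====
-- first = lambda x: (x[0])
--
-- def countNegatedContexts(tripleSetCurrentDoc):
--     '''Function to get the count of negation contexts in tweets, where a negation context is each time
--     a tweet switches not negative context to a negative context,an adaptation of code from
--    Webis: An Ensemble for Twitter Sentiment Detection (Hagen, MatthiasPotthast, MartinBuchner, Michel Stein, Benno'''
--     negatedTokenBools = map(lambda token: '_NEG' in token ,map(first, tripleSetCurrentDoc))
--     negatedSegment = False
--     negationCount = 0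
--     for curBool in negatedTokenBools:
--         if curBool:
--             negatedSegment = True
--         if negatedSegment:
--             if curBool == False:
--                 negationCount +=1
--                 negatedSegment = False
--     if negatedSegment:
--         #handle situation when no punctuation or end of tweet occurs
--         negationCount +=1
--
--     return negationCount
-- ===== SOURCE B (Python) =====
-- def countNegatedContexts(tripleSetCurrentDoc):
--     # chunk-then-count: build the boolean list, split it into maximal constant runs,
--     # then count the runs whose value is True
--     bools = ['_NEG' in t[0] for t in tripleSetCurrentDoc]
--     runs = []
--     for b in bools:
--         if runs and runs[-1][0] == b:
--             runs[-1].append(b)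
--         else:
--             runs.append([b])
--     return sum(1 for run in runs if run[0])
-- ===== Notes on version B (the rewrite author's own statement) =====
-- stated objective: alternative
-- what changed: Replaces A's stateful negated-segment flag with a falling-edge count and trailing fixup by a chunk-then-count decomposition: split the boolean list into maximal constant runs and count the True runs.
import Mathlib
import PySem

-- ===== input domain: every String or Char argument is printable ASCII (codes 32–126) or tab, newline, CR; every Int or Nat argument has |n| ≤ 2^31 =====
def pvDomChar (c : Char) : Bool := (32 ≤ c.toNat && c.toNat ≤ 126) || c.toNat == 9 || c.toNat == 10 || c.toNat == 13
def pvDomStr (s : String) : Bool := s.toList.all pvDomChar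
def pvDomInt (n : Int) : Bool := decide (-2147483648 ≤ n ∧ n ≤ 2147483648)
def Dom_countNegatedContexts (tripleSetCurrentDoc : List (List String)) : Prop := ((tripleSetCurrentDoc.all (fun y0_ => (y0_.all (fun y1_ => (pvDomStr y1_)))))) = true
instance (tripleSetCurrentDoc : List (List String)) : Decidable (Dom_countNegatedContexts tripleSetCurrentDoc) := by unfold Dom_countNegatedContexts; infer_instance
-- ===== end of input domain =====

-- B replaces A's flag-plus-trailing-fixup loop by a chunk-then-count decomposition
-- (split the boolean list into maximal constant runs, count the True runs).

-- ===== PORT A =====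
-- first = lambda x: x[0]; under Pre_ (no empty triple) pyGet? is some, so getD "" is exact
def pvFirst (x : List String) : String := (PySem.List.pyGet? x 0).getD ""

-- '_NEG' in token
def pvNeg (token : String) : Bool := PySem.Str.isIn "_NEG" token

-- the for-loop body over (negatedSegment, negationCount)
def pvStepA (st : Bool × Int) (curBool : Bool) : Bool × Int :=
  let st1 := if curBool then (true, st.2) else st
  if st1.1 then (if curBool = false then (false, st1.2 + 1) else st1) else st1

def countNegatedContexts (tripleSetCurrentDoc : List (List String)) : Int :=
  let negatedTokenBools := (tripleSetCurrentDoc.map pvFirst).map pvNeg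
  let st := negatedTokenBools.foldl pvStepA (false, 0)
  if st.1 then st.2 + 1 else st.2

-- ===== PORT B =====
-- the run-building loop body: append to the last run if its first element equals b, else start a run
def pvStepB (runs : List (List Bool)) (b : Bool) : List (List Bool) :=
  match runs.getLast? with
  | some r => if r.head? = some b then runs.dropLast ++ [r ++ [b]] else runs ++ [[b]]
  | none => [[b]]

def countNegatedContexts_alt (tripleSetCurrentDoc : List (List String)) : Int :=
  let bools := tripleSetCurrentDoc.map (fun t => pvNeg (pvFirst t))
  let runs := bools.foldl (fun runs b => pvStepB runs b) []
  ((runs.filter (fun run => run.headD false)).length : Int)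

-- ===== PRECONDITION & SPEC =====
-- A raises IndexError (t[0]) on any empty triple; B raises there too, so those inputs are excluded.
def Pre_countNegatedContexts (tripleSetCurrentDoc : List (List String)) : Prop :=
  ∀ t ∈ tripleSetCurrentDoc, t ≠ []
instance (tripleSetCurrentDoc : List (List String)) : Decidable (Pre_countNegatedContexts tripleSetCurrentDoc) := by unfold Pre_countNegatedContexts; infer_instance

def pvWitness_countNegatedContexts : List (List String) :=
  [["good_NEG", "JJ", "0.5"], ["day", "NN", "0.1"], ["bad_NEG", "JJ", "-0.4"]]

def Spec_countNegatedContexts (tripleSetCurrentDoc : List (List String)) (out : Int) : Prop := out = countNegatedContexts_alt tripleSetCurrentDoc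
instance (tripleSetCurrentDoc : List (List String)) (out : Int) : Decidable (Spec_countNegatedContexts tripleSetCurrentDoc out) := by unfold Spec_countNegatedContexts; infer_instance

-- ===== CLAIM (what is proved, stated in full; the proofs are below) =====
def Claim_equal_countNegatedContexts : Prop := ∀ (tripleSetCurrentDoc : List (List String)), Dom_countNegatedContexts tripleSetCurrentDoc → Pre_countNegatedContexts tripleSetCurrentDoc → Spec_countNegatedContexts tripleSetCurrentDoc (countNegatedContexts tripleSetCurrentDoc)

-- ===== LEMMAS AND PROOFS =====

-- abstract run count given the previous element (rising-edge count, counting a leading True)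
def pvG (prev : Option Bool) : List Bool → Nat
  | [] => 0
  | b :: bs => (if b ∧ prev ≠ some b then 1 else 0) + pvG (some b) bs

-- A's loop followed by its trailing fixup, as a function of the flag and the remaining booleans
def pvH (seg : Bool) : List Bool → Nat
  | [] => if seg then 1 else 0
  | b :: bs => if b then pvH true bs else (if seg then 1 else 0) + pvH false bs

lemma stepA_char (bs : List Bool) : ∀ (seg : Bool) (cnt : Int),
    (let st := bs.foldl pvStepA (seg, cnt); if st.1 then st.2 + 1 else st.2)
      = cnt + (pvH seg bs : Int) := by
  induction bs with
  | nil => intro seg cnt; cases seg <;> simp [pvH]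
  | cons b bs ih =>
    intro seg cnt
    cases b <;> cases seg <;>
      simp [pvStepA, pvH, List.foldl_cons, ih] <;> push_cast <;> ring

lemma pvH_eq_pvG : ∀ bs : List Bool,
    pvH true bs = pvG (some true) bs + 1 ∧
    pvH false bs = pvG none bs ∧
    pvH false bs = pvG (some false) bs := by
  intro bs
  induction bs with
  | nil => simp [pvH, pvG]
  | cons b bs ih =>
    obtain ⟨h1, h2, h3⟩ := ih
    cases b <;> simp [pvH, pvG, h1, h2] <;> omega

def pvPrevOf (runs : List (List Bool)) : Option Bool :=
  runs.getLast?.bind (·.head?)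

def pvCountT (runs : List (List Bool)) : Nat :=
  (runs.filter (fun run => run.headD false)).length

lemma pvStepB_countT (runs : List (List Bool)) (b : Bool) :
    pvCountT (pvStepB runs b)
      = pvCountT runs + (if b ∧ pvPrevOf runs ≠ some b then 1 else 0) := by
  unfold pvStepB pvPrevOf pvCountT
  rcases h : runs.getLast? with _ | r
  · rw [List.getLast?_eq_none_iff] at h
    subst h; cases b <;> simp
  · have hr : runs = runs.dropLast ++ [r] := by
      rcases List.eq_nil_or_concat runs with rfl | ⟨ys, a, rfl⟩
      · simp at h
      · simp_all
    by_cases hh : r.head? = some b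
    · rcases r with _ | ⟨x, r'⟩
      · simp at hh
      · simp only [List.head?_cons, Option.some.injEq] at hh
        subst hh
        rw [hr]; simp only [List.filter_append]
        rcases x <;> simp [h]
    · rw [hr]
      simp only [List.filter_append, List.length_append, h, Option.bind_some]
      clear h hr
      rcases b <;> simp [List.filter_cons, hh] <;> split_ifs <;> simp_all <;> omega

lemma pvStepB_prev (runs : List (List Bool)) (b : Bool) :
    pvPrevOf (pvStepB runs b) = some b := by
  unfold pvStepB pvPrevOf
  rcases h : runs.getLast? with _ | r
  · simp
  · by_cases hh : r.head? = some b
    · rcases r with _ | ⟨x, r'⟩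
      · simp at hh
      · simp_all
    · simp [hh]

lemma stepB_char (bs : List Bool) : ∀ runs : List (List Bool),
    pvCountT (bs.foldl (fun runs b => pvStepB runs b) runs)
      = pvCountT runs + pvG (pvPrevOf runs) bs := by
  induction bs with
  | nil => intro runs; simp [pvG]
  | cons b bs ih =>
    intro runs
    simp only [List.foldl_cons, ih, pvStepB_countT, pvStepB_prev, pvG]
    omega

-- ===== VERDICT (by name: the statement is the Claim_ definition above) =====
theorem countNegatedContexts_spec : Claim_equal_countNegatedContexts := by
  intro doc _ _
  show _ = _
  unfold countNegatedContexts countNegatedContexts_alt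
  simp only [List.map_map]
  have hB := stepB_char ((doc.map (fun t => pvNeg (pvFirst t)))) []
  have hA := stepA_char ((doc.map (fun t => pvNeg (pvFirst t)))) false 0
  simp only [pvCountT, pvPrevOf] at hB
  simp only [List.getLast?_nil, Option.bind_none, List.filter_nil, List.length_nil,
    Nat.zero_add] at hB
  simp only [Function.comp_def]
  rw [hA, hB, (pvH_eq_pvG _).2.1]
  ring
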